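-- pv_equiv track=rewrite | github.com/knusperturner-sudo/Schieberei | src/schiebeparkplatz.py | find_key_positions
-- ===== SOURCE A (Python) =====
-- def find_key_positions(parkplatz: list, auto: str) -> dict:
--     indices = [i for i, x in enumerate(parkplatz) if x == auto]
--     if not indices:
--         return {"left": None, "right": None}
--     left_pos = min(indices) - 1
--     right_pos = max(indices) + 1
--     if left_pos < 0:
--         left_pos = None
--     if right_pos >= len(parkplatz):
--         right_pos = None
--     return {"left": left_pos, "right": right_pos}
-- ===== SOURCE B (Python) =====
-- def find_key_positions(parkplatz: list, auto: str) -> dict: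
--     first = None
--     last = None
--     for i, x in enumerate(parkplatz):
--         if x == auto:
--             if first is None:
--                 first = i
--             last = i
--     if first is None:
--         return {"left": None, "right": None}
--     left = first - 1
--     right = last + 1
--     return {"left": left if left >= 0 else None,
--             "right": right if right < len(parkplatz) else None}
-- ===== Notes on version B (the rewrite author's own statement) =====
-- stated objective: faster
-- what changed: Replaces the index-list comprehension plus separate min() and max() scans with a single pass that maintains only the first and last matching index as two scalars.
import Mathlib
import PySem

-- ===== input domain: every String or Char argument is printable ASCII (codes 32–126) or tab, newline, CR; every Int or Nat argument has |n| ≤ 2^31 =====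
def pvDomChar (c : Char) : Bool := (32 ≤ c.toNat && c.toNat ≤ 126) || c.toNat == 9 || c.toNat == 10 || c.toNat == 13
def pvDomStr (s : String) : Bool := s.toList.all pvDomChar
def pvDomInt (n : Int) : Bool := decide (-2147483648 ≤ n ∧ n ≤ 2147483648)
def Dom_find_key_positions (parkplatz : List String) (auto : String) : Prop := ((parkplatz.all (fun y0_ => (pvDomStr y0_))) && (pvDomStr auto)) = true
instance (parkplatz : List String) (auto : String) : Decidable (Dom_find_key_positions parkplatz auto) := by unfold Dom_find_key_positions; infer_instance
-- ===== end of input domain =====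

-- B replaces the index-list comprehension plus min()/max() scans with one pass keeping first/last match (constant extra space).


-- ===== PORT A =====
def find_key_positions (parkplatz : List String) (auto : String) : List (String × Option Int) :=
  let indices := ((PySem.List.enumerate parkplatz).filter (fun p => p.2 == auto)).map (fun p => p.1)
  if indices = [] then [("left", none), ("right", none)]
  else
    let left_pos := (PySem.List.min? indices (fun x => x)).getD 0 - 1
    let right_pos := (PySem.List.max? indices (fun x => x)).getD 0 + 1
    let left : Option Int := if left_pos < 0 then none else some left_pos
    let right : Option Int := if right_pos ≥ (parkplatz.length : Int) then none else some right_pos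
    [("left", left), ("right", right)]

-- ===== PORT B =====
-- single pass: state = (first matching index, last matching index)
def pvStepB (auto : String) (s : Option Int × Option Int) (p : Int × String) : Option Int × Option Int :=
  if p.2 == auto then ((if s.1 = none then some p.1 else s.1), some p.1) else s

def find_key_positions_alt (parkplatz : List String) (auto : String) : List (String × Option Int) :=
  let st := (PySem.List.enumerate parkplatz).foldl (pvStepB auto) (none, none)
  match st.1, st.2 with
  | some f, some l =>
      let left := f - 1
      let right := l + 1
      [("left", if left ≥ 0 then some left else none),
       ("right", if right < (parkplatz.length : Int) then some right else none)]
  | _, _ => [("left", none), ("right", none)]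

-- ===== PRECONDITION & SPEC =====
def Spec_find_key_positions (parkplatz : List String) (auto : String) (out : List (String × Option Int)) : Prop := out = find_key_positions_alt parkplatz auto
instance (parkplatz : List String) (auto : String) (out : List (String × Option Int)) : Decidable (Spec_find_key_positions parkplatz auto out) := by unfold Spec_find_key_positions; infer_instance

-- ===== CLAIM (what is proved, stated in full; the proofs are below) =====
def Claim_equal_find_key_positions : Prop := ∀ (parkplatz : List String) (auto : String), Dom_find_key_positions parkplatz auto → Spec_find_key_positions parkplatz auto (find_key_positions parkplatz auto)

-- ===== LEMMAS AND PROOFS =====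

-- unconditional step on the filtered-and-projected index list
def pvG (s : Option Int × Option Int) (i : Int) : Option Int × Option Int :=
  ((if s.1 = none then some i else s.1), some i)

theorem pv_fold_enum_eq (parkplatz : List String) (auto : String) :
    (PySem.List.enumerate parkplatz).foldl (pvStepB auto) (none, none)
      = (((PySem.List.enumerate parkplatz).filter (fun p => p.2 == auto)).map (fun p => p.1)).foldl pvG (none, none) := by
  rw [List.foldl_map, List.foldl_filter]
  rfl

theorem pv_foldG_some (l : List Int) (f : Int) (b : Option Int) :
    l.foldl pvG (some f, b) = (some f, match l.getLast? with | some y => some y | none => b) := by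
  induction l generalizing b with
  | nil => rfl
  | cons x t ih =>
      simp only [List.foldl_cons, pvG]
      rw [show (if (some f : Option Int) = none then some x else some f) = some f by simp, ih]
      cases t with
      | nil => rfl
      | cons y t' =>
          obtain ⟨z, hz⟩ : ∃ z, (y :: t').getLast? = some z :=
            ⟨_, List.getLast?_eq_some_getLast (by simp)⟩
          simp [hz]

theorem pv_foldG_cons (x : Int) (t : List Int) :
    (x :: t).foldl pvG (none, none) = (some x, some ((x :: t).getLast (by simp))) := by
  simp only [List.foldl_cons, pvG]
  simp only [if_true]
  rw [pv_foldG_some]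
  cases h : t.getLast? with
  | none =>
      have ht : t = [] := List.getLast?_eq_none_iff.mp h
      subst ht; rfl
  | some y =>
      have ht : t ≠ [] := by intro he; subst he; simp at h
      have : (x :: t).getLast (by simp) = t.getLast ht := List.getLast_cons ht
      rw [this]
      have := List.getLast?_eq_some_getLast ht
      rw [this] at h
      simp [h]

theorem pv_foldl_min_of_pairwise (x : Int) (t : List Int) (h : (x :: t).Pairwise (· < ·)) :
    t.foldl min x = x := by
  induction t generalizing x with
  | nil => rfl
  | cons y t' ih =>
      simp only [List.foldl_cons]
      have hxy : x < y := (List.pairwise_cons.mp h).1 y (by simp)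
      have : min x y = x := min_eq_left hxy.le
      rw [this]
      have hp : (x :: t').Pairwise (· < ·) := by
        have h1 := (List.pairwise_cons.mp h).1
        have h2 := List.pairwise_cons.mp (List.pairwise_cons.mp h).2
        exact List.pairwise_cons.mpr ⟨fun a ha => h1 a (by simp [ha]), h2.2⟩
      exact ih x hp

theorem pv_foldl_max_of_pairwise (x : Int) (t : List Int) (h : (x :: t).Pairwise (· < ·)) :
    t.foldl max x = (x :: t).getLast (by simp) := by
  induction t generalizing x with
  | nil => rfl
  | cons y t' ih =>
      simp only [List.foldl_cons]
      have hxy : x < y := (List.pairwise_cons.mp h).1 y (by simp)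
      have hm : max x y = y := max_eq_right hxy.le
      rw [hm, List.getLast_cons (by simp : (y :: t') ≠ [])]
      exact ih y (List.pairwise_cons.mp h).2

theorem pv_indices_pairwise (parkplatz : List String) (auto : String) :
    ((((PySem.List.enumerate parkplatz).filter (fun p => p.2 == auto)).map (fun p => p.1)).Pairwise (· < ·)) := by
  rw [List.pairwise_map]
  exact List.Pairwise.filter _ (PySem.List.pairwise_lt_enumerate parkplatz 0)

-- ===== VERDICT (by name: the statement is the Claim_ definition above) =====
theorem find_key_positions_spec : Claim_equal_find_key_positions := by
  intro parkplatz auto _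
  unfold Spec_find_key_positions find_key_positions find_key_positions_alt
  rw [pv_fold_enum_eq]
  cases hidx : ((PySem.List.enumerate parkplatz).filter (fun p => p.2 == auto)).map (fun p => p.1) with
  | nil => simp
  | cons x t =>
      have hpw : ((x :: t).Pairwise (· < ·)) := by
        rw [← hidx]; exact pv_indices_pairwise parkplatz auto
      rw [pv_foldG_cons]
      simp only [if_neg (by simp : ¬(x :: t = []))]
      rw [PySem.List.min?_id_cons, PySem.List.max?_id_cons,
          pv_foldl_min_of_pairwise x t hpw, pv_foldl_max_of_pairwise x t hpw]
      simp only [Option.getD_some]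
      have h1 : ∀ (a : Int), (if a - 1 < 0 then (none : Option Int) else some (a - 1)) = (if a - 1 ≥ 0 then some (a - 1) else none) := by
        intro a; split_ifs with p q <;> first | rfl | omega
      have h2 : ∀ (a : Int), (if a + 1 ≥ (parkplatz.length : Int) then (none : Option Int) else some (a + 1)) = (if a + 1 < (parkplatz.length : Int) then some (a + 1) else none) := by
        intro a; split_ifs with p q <;> first | rfl | omega
      rw [h1, h2]
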